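-- pv_equiv track=rewrite | github.com/tyydev1/pypi-tinygenkey | tinygenkey/sandbox.py | keys_format
-- ===== SOURCE A (Python) =====
-- def keys_format(
--         key: str,
--         group_size: int = 4,
--         sep: str = "-",
-- ) -> str:
--     """
--     Format a key with separators for readability.
--
--     Args:
--         key: The key to format
--         group_size: Characters per group (default 4)
--         sep: What to put between groups (default "-")
--
--     Returns:
--         Formatted key string
--
--     Examples:
--         >>> keys_format("ABCD1234EFGH5678")
--         "ABCD-1234-EFGH-5678"
--
--         >>> keys_format("ABCD1234EFGH5678", group_size=8, separator=".")
--         "ABCD1234.EFGH5678"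
--     """
--     if key == '':
--         return ''
--
--     if len(key) < group_size:
--         return key
--
--     chunks = []
--     for i in range(0, len(key), group_size):
--         chunk = key[i : i + group_size]
--         chunks.append(chunk)
--     result = sep.join(chunks)
--     return result
-- ===== SOURCE B (Python) =====
-- def keys_format(
--         key: str,
--         group_size: int = 4,
--         sep: str = "-",
-- ) -> str:
--     """Single pass over the characters, inserting sep at every group boundary."""
--     if not key:
--         return ''
--     if group_size <= 0:
--         raise ValueError("group_size must be positive")
--     out = []
--     for i, c in enumerate(key):
--         if i and i % group_size == 0:
--             out.append(sep)
--         out.append(c)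
--     return ''.join(out)
-- ===== Notes on version B (the rewrite author's own statement) =====
-- stated objective: alternative
-- what changed: B builds the result in one character-by-character scan, inserting the separator whenever the running index is a nonzero multiple of group_size, instead of A's slicing of fixed-size chunks followed by a join.
-- outside the precondition, e.g. on keys_format('ABCDE', -3, '-'): A returns '', B raises ValueError
import Mathlib
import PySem

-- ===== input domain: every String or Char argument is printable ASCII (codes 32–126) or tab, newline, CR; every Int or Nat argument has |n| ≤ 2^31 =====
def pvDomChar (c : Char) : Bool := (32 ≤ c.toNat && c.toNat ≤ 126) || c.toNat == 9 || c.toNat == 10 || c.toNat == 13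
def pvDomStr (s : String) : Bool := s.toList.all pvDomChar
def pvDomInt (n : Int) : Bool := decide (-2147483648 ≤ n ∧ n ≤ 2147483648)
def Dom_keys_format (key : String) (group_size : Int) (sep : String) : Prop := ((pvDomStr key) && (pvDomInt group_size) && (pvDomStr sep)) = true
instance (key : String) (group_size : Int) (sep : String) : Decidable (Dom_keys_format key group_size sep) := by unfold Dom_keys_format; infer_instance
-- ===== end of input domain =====

-- B replaces A's chunk-slicing + join by a single per-character scan that inserts the
-- separator at every nonzero index divisible by group_size (objective: alternative).


-- ===== PORT A =====
def keys_format (key : String) (group_size : Int) (sep : String) : String :=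
  if key = "" then ""
  else if PySem.Str.len key < group_size then key
  else
    let chunks := (PySem.List.pyRange 0 (PySem.Str.len key) group_size).foldl
        (fun acc i => acc ++ [PySem.List.slice key.toList (some i) (some (i + group_size))])
        ([] : List (List Char))
    String.ofList (PySem.Chars.join sep.toList chunks)

-- ===== PORT B =====
-- Python B raises ValueError for group_size ≤ 0 on a nonempty key (outside Pre_); the port
-- returns "" there.
def keys_format_alt (key : String) (group_size : Int) (sep : String) : String :=
  if key.toList = [] then ""
  else if group_size ≤ 0 then ""
  else
    String.ofList ((PySem.List.enumerate key.toList 0).foldl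
      (fun acc p =>
        (if p.1 ≠ 0 ∧ PySem.Int.mod p.1 group_size = 0 then acc ++ sep.toList else acc) ++ [p.2])
      [])

-- ===== PRECONDITION & SPEC =====
-- Pre_ excludes nonpositive group_size on a nonempty key: for group_size == 0 A raises
-- ValueError (range step 0), and for negative group_size A's empty range silently drops the
-- key and returns the empty string — B raises ValueError on all of these inputs.
def Pre_keys_format (key : String) (group_size : Int) (sep : String) : Prop :=
  key = "" ∨ 1 ≤ group_size
instance (key : String) (group_size : Int) (sep : String) : Decidable (Pre_keys_format key group_size sep) := by unfold Pre_keys_format; infer_instance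

def pvWitness_keys_format : String × Int × String := ("ABCD1234EFGH", 4, "-")

def Spec_keys_format (key : String) (group_size : Int) (sep : String) (out : String) : Prop := out = keys_format_alt key group_size sep
instance (key : String) (group_size : Int) (sep : String) (out : String) : Decidable (Spec_keys_format key group_size sep out) := by unfold Spec_keys_format; infer_instance

-- ===== CLAIM (what is proved, stated in full; the proofs are below) =====
def Claim_equal_keys_format : Prop := ∀ (key : String) (group_size : Int) (sep : String), Dom_keys_format key group_size sep → Pre_keys_format key group_size sep → Spec_keys_format key group_size sep (keys_format key group_size sep)

-- ===== LEMMAS AND PROOFS =====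

lemma pyRange_nonpos (b s : Int) (hs : 0 < s) (hb : b ≤ 0) :
    PySem.List.pyRange 0 b s = [] := by
  rw [PySem.List.pyRange_of_pos _ _ hs]
  have : ¬ ((0:Int) < b) := by omega
  simp [this]

lemma pyRange_pos_cons (a b s : Int) (hs : 0 < s) (hab : a < b) :
    PySem.List.pyRange a b s = a :: PySem.List.pyRange (a + s) b s := by
  rw [PySem.List.pyRange_of_pos _ _ hs, PySem.List.pyRange_of_pos _ _ hs]
  have h1 : ((b - a + s - 1) / s).toNat = ((b - (a+s) + s - 1) / s).toNat + 1 := by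
    have : (b - a + s - 1) = (b - (a+s) + s - 1) + 1 * s := by ring
    rw [this, Int.add_mul_ediv_right _ _ (by omega)]
    have h2 : 0 ≤ (b - (a+s) + s - 1) / s := Int.ediv_nonneg (by omega) (by omega)
    omega
  by_cases h : a + s < b
  · simp only [hab, if_pos, h, if_true, h1]
    rw [List.range_succ_eq_map]
    simp [List.map_map, Function.comp]
    intro k _; ring
  · have hz : ((b - (a+s) + s - 1) / s) = 0 := by
      apply Int.ediv_eq_zero_of_lt <;> omega
    simp only [hab, if_true, h, if_false]
    rw [h1, hz]
    simp

lemma pyRange_shift (a b s : Int) (hs : 0 < s) :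
    PySem.List.pyRange a b s = (PySem.List.pyRange 0 (b - a) s).map (a + ·) := by
  rw [PySem.List.pyRange_of_pos _ _ hs, PySem.List.pyRange_of_pos _ _ hs]
  have h : a < b ↔ (0:Int) < b - a := by omega
  simp only [h, List.map_map, Function.comp, sub_zero, zero_add]
  apply List.map_congr_left; intro k _; simp [Function.comp]

def chunksC (gp : Nat) : List Char → List (List Char)
  | [] => []
  | x :: xs => (x :: xs.take gp) :: chunksC gp (xs.drop gp)
termination_by l => l.length
decreasing_by simp

lemma chunks_eq (g : Nat) (l : List Char) :
    (PySem.List.pyRange 0 l.length ((g : Int) + 1)).map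
        (fun i => PySem.List.slice l (some i) (some (i + ((g : Int) + 1)))) = chunksC g l := by
  have hs : (0:Int) < (g:Int) + 1 := by positivity
  induction hn : l.length using Nat.strong_induction_on generalizing l with
  | _ n ih =>
    subst hn
    match l with
    | [] => rw [show ((([]:List Char).length:Int)) = 0 by simp, pyRange_nonpos _ _ hs le_rfl]; simp [chunksC]
    | x :: xs =>
      have hlen : (0:Int) < ((x::xs).length : Int) := by exact_mod_cast xs.length.succ_pos
      rw [pyRange_pos_cons _ _ _ hs hlen, List.map_cons]
      have hhead : PySem.List.slice (x::xs) (some 0) (some (0 + ((g:Int)+1))) = x :: xs.take g := by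
        rw [PySem.List.slice_toNat _ le_rfl (by omega)]
        have : ((0:Int) + ((g:Int)+1)).toNat = g + 1 := by omega
        simp [this, List.take_succ_cons]
      rw [hhead, pyRange_shift _ _ _ hs, List.map_map]
      have htail : ((PySem.List.pyRange 0 (((x::xs).length:Int) - (0 + ((g:Int)+1))) ((g:Int)+1)).map
          ((fun i => PySem.List.slice (x::xs) (some i) (some (i + ((g:Int)+1)))) ∘ ((0 + ((g:Int)+1)) + ·)))
          = (PySem.List.pyRange 0 ((xs.drop g).length : Int) ((g:Int)+1)).map
              (fun i => PySem.List.slice (xs.drop g) (some i) (some (i + ((g:Int)+1)))) := by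
        have hrange : PySem.List.pyRange 0 (((x::xs).length:Int) - (0 + ((g:Int)+1))) ((g:Int)+1)
            = PySem.List.pyRange 0 ((xs.drop g).length : Int) ((g:Int)+1) := by
          by_cases hbig : g ≤ xs.length
          · congr 1; simp [List.length_drop]; omega
          · rw [pyRange_nonpos _ _ hs (by simp; omega), pyRange_nonpos _ _ hs (by simp; omega)]
        rw [hrange]
        apply List.map_congr_left
        intro j hj
        obtain ⟨hj0, -, -⟩ := (PySem.List.mem_pyRange_iff_of_pos hs j).1 hj
        simp only [Function.comp]
        rw [PySem.List.slice_toNat _ (by omega) (by omega),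
            PySem.List.slice_toNat _ (by omega) (by omega)]
        have e1 : (0 + ((g:Int)+1) + j + ((g:Int)+1)).toNat - (0 + ((g:Int)+1) + j).toNat = g + 1 := by omega
        have e2 : ((j + ((g:Int)+1)).toNat - j.toNat) = g + 1 := by omega
        have e3 : (0 + ((g:Int)+1) + j).toNat = j.toNat + (g + 1) := by omega
        rw [e1, e2, e3, show (List.drop g xs) = List.drop (g+1) (x::xs) by simp, List.drop_drop]
        rw [Nat.add_comm j.toNat (g+1)]
      rw [htail, ih (xs.drop g).length (by simp [List.length_drop]) (xs.drop g) rfl]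
      rw [chunksC]

lemma chunk_fold (g : Nat) (sep : List Char) (c : List Char) :
    ∀ (s : Int) (acc : List Char),
      (∀ i : Int, s ≤ i → i < s + c.length → ¬(i ≠ 0 ∧ PySem.Int.mod i ((g : Int) + 1) = 0)) →
      (PySem.List.enumerate c s).foldl
        (fun acc p => (if p.1 ≠ 0 ∧ PySem.Int.mod p.1 ((g : Int) + 1) = 0 then acc ++ sep else acc) ++ [p.2]) acc
        = acc ++ c := by
  induction c with
  | nil => intro s acc h; simp [PySem.List.enumerate_nil]
  | cons y c ih =>
      intro s acc h
      rw [PySem.List.enumerate_cons, List.foldl_cons]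
      have hc : ¬ (s ≠ 0 ∧ PySem.Int.mod s ((g:Int)+1) = 0) :=
        h s le_rfl (by simp)
      rw [if_neg hc]
      rw [ih (s+1) (acc ++ [y]) (fun i h1 h2 => h i (by omega) (by simp at h2 ⊢; omega))]
      simp

lemma not_mid_multiple (g : Nat) (q i : Int) (h1 : q * ((g:Int)+1) < i) (h2 : i < (q+1) * ((g:Int)+1)) :
    ¬(i ≠ 0 ∧ PySem.Int.mod i ((g : Int) + 1) = 0) := by
  rintro ⟨-, hm⟩
  obtain ⟨t, ht⟩ := (PySem.Int.mod_eq_zero_iff_dvd _ _).1 hm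
  subst ht
  have hgpos : (0:Int) < (g:Int)+1 := by positivity
  have hq : q < t := by nlinarith
  have ht2 : t < q + 1 := by nlinarith
  omega

lemma scan_rest (g : Nat) (sep : List Char) (m : List Char) :
    ∀ (q : Int), 1 ≤ q → ∀ (acc : List Char),
      (PySem.List.enumerate m (q * ((g : Int) + 1))).foldl
        (fun acc p => (if p.1 ≠ 0 ∧ PySem.Int.mod p.1 ((g : Int) + 1) = 0 then acc ++ sep else acc) ++ [p.2]) acc
        = acc ++ (chunksC g m).flatMap (fun c => sep ++ c) := by
  have hgpos : (0:Int) < (g:Int)+1 := by positivity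
  induction hn : m.length using Nat.strong_induction_on generalizing m with
  | _ n ih =>
    subst hn
    match m with
    | [] => intro q hq acc; simp [PySem.List.enumerate_nil, chunksC]
    | x :: xs =>
      intro q hq acc
      rw [chunksC, List.flatMap_cons]
      conv_lhs => rw [show (x :: xs) = (x :: xs.take g) ++ xs.drop g by simp]
      rw [PySem.List.enumerate_append, List.foldl_append, PySem.List.enumerate_cons, List.foldl_cons]
      have hfire : (q * ((g:Int)+1) ≠ 0 ∧ PySem.Int.mod (q * ((g:Int)+1)) ((g:Int)+1) = 0) := by
        constructor
        · have : (1:Int) * ((g:Int)+1) ≤ q * ((g:Int)+1) := by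
            apply mul_le_mul_of_nonneg_right hq (le_of_lt hgpos)
          omega
        · exact (PySem.Int.mod_eq_zero_iff_dvd _ _).2 ⟨q, by ring⟩
      rw [if_pos hfire]
      rw [chunk_fold g sep (xs.take g) (q * ((g:Int)+1) + 1) (acc ++ sep ++ [x])
          (by
            intro i hi1 hi2
            apply not_mid_multiple g q i (by omega)
            have hlen : (List.take g xs).length ≤ g := by simp
            have : ((List.take g xs).length : Int) ≤ (g:Int) := by exact_mod_cast hlen
            have : i < q * ((g:Int)+1) + 1 + (g:Int) := by omega
            nlinarith)]
      by_cases hbig : g ≤ xs.length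
      · have hstart : q * ((g:Int)+1) + ((x :: List.take g xs).length : Int) = (q+1) * ((g:Int)+1) := by
          have : (List.take g xs).length = g := by simp [hbig]
          simp [this]; ring
        rw [hstart, ih (xs.drop g).length (by simp [List.length_drop]) (xs.drop g) rfl (q+1) (by omega)]
        simp [List.append_assoc]
      · have hnil : xs.drop g = [] := by
          apply List.drop_eq_nil_of_le; omega
        rw [hnil]
        simp [PySem.List.enumerate_nil, chunksC, List.append_assoc]

lemma intercalate_cons (sep c : List Char) (cs : List (List Char)) :
    List.intercalate sep (c :: cs) = c ++ cs.flatMap (fun d => sep ++ d) := by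
  induction cs generalizing c with
  | nil => simp [List.intercalate]
  | cons d cs ih =>
      have := ih d
      simp only [List.intercalate, List.intersperse, List.flatten] at this ⊢
      simp [this, List.flatMap_cons]

lemma scan_eq (g : Nat) (sep : List Char) (l : List Char) (hl : l ≠ []) :
    (PySem.List.enumerate l 0).foldl
        (fun acc p => (if p.1 ≠ 0 ∧ PySem.Int.mod p.1 ((g : Int) + 1) = 0 then acc ++ sep else acc) ++ [p.2]) []
      = List.intercalate sep (chunksC g l) := by
  have hgpos : (0:Int) < (g:Int)+1 := by positivity
  match l with
  | x :: xs =>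
    rw [chunksC, intercalate_cons]
    conv_lhs => rw [show (x :: xs) = (x :: xs.take g) ++ xs.drop g by simp]
    rw [PySem.List.enumerate_append, List.foldl_append, PySem.List.enumerate_cons, List.foldl_cons]
    rw [if_neg (by simp)]
    rw [chunk_fold g sep (xs.take g) (0+1) ([] ++ [x])
        (by
          intro i hi1 hi2
          apply not_mid_multiple g 0 i (by omega)
          have hlen : (List.take g xs).length ≤ g := by simp
          have : ((List.take g xs).length : Int) ≤ (g:Int) := by exact_mod_cast hlen
          ring_nf
          omega)]
    by_cases hbig : g ≤ xs.length
    · have hstart : (0:Int) + ((x :: List.take g xs).length : Int) = 1 * ((g:Int)+1) := by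
        have : (List.take g xs).length = g := by simp [hbig]
        simp [this]
      rw [hstart, scan_rest g sep (xs.drop g) 1 le_rfl]
      rfl
    · have hnil : xs.drop g = [] := by apply List.drop_eq_nil_of_le; omega
      rw [hnil]
      simp [PySem.List.enumerate_nil, chunksC]

lemma chunksC_small (g : Nat) (x : Char) (xs : List Char) (h : xs.length ≤ g) :
    chunksC g (x :: xs) = [x :: xs] := by
  rw [chunksC, List.take_of_length_le h, List.drop_eq_nil_of_le h, chunksC]

theorem keys_format_eq_alt : ∀ (key : String) (group_size : Int) (sep : String),
    (key = "" ∨ 1 ≤ group_size) →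
    keys_format key group_size sep = keys_format_alt key group_size sep := by
  intro key gs sep hpre
  by_cases hk : key = ""
  · subst hk; rfl
  · have hkl : key.toList ≠ [] := by
      intro hc; apply hk
      have := congrArg String.ofList hc
      simpa [String.ofList_toList] using this
    have hgs : 1 ≤ gs := hpre.resolve_left hk
    obtain ⟨g, hg⟩ : ∃ g : Nat, gs = (g:Int) + 1 := ⟨(gs-1).toNat, by omega⟩
    subst hg
    rw [keys_format, keys_format_alt, if_neg hk, if_neg hkl, if_neg (show ¬ ((g:Int)+1 ≤ 0) by omega)]
    rw [scan_eq g sep.toList key.toList hkl]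
    by_cases hsmall : PySem.Str.len key < (g:Int) + 1
    · rw [if_pos hsmall]
      match hx : key.toList, hkl with
      | x :: xs, _ =>
        have hxs : xs.length ≤ g := by
          rw [PySem.Str.len_eq, hx] at hsmall
          simp at hsmall; omega
        rw [chunksC_small g x xs hxs]
        have : List.intercalate sep.toList [x :: xs] = x :: xs := by simp [List.intercalate]
        rw [this, ← hx, String.ofList_toList]
    · rw [if_neg hsmall]
      simp only [PySem.List.foldl_append_singleton_eq_map, List.nil_append]
      rw [PySem.Str.len_eq, chunks_eq g key.toList]
      rfl

-- ===== VERDICT (by name: the statement is the Claim_ definition above) =====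
theorem keys_format_spec : Claim_equal_keys_format := by
  intro key group_size sep _ hpre
  unfold Spec_keys_format
  exact keys_format_eq_alt key group_size sep hpre
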